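-- pv_equiv track=rewrite | github.com/quantumrook/qr-static-site-generator | handlers/callout.py | handle_callouts
-- ===== SOURCE A (Python) =====
-- def handle_callouts(markdown_body):
--     callout_counter = 1
--     callout_indices = [i for i, line in enumerate(markdown_body) if "> " in line]
--     previous_counter = 0
--     for i in callout_indices:
--         callout_content = markdown_body[i].strip("\n")
--         if previous_counter == callout_counter:
--             markdown_body[i] = callout_content.replace("> ", "<br/>\n")
--         else:
--             markdown_body[i] = callout_content.replace("> ", f'<div id="callout-{callout_counter}"><blockquote>')
--             previous_counter = callout_counter
--         if (i+1) not in callout_indices: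
--             markdown_body[i] += "</blockquote></div>\n"
--             callout_counter += 1
--
--     return markdown_body
-- ===== SOURCE B (Python) =====
-- def handle_callouts(markdown_body):
--     # Block-at-a-time: scan for each maximal run of callout lines and render
--     # the whole block as a unit; rebuilds the list and writes it back in place.
--     result = []
--     counter = 1
--     i = 0
--     n = len(markdown_body)
--     while i < n:
--         if "> " not in markdown_body[i]:
--             result.append(markdown_body[i])
--             i += 1
--             continue
--         j = i
--         while j < n and "> " in markdown_body[j]:
--             j += 1
--         block = [line.strip("\n") for line in markdown_body[i:j]]
--         rendered = [block[0].replace("> ", f'<div id="callout-{counter}"><blockquote>')]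
--         rendered += [b.replace("> ", "<br/>\n") for b in block[1:]]
--         rendered[-1] += "</blockquote></div>\n"
--         result.extend(rendered)
--         counter += 1
--         i = j
--     markdown_body[:] = result
--     return markdown_body
-- ===== Notes on version B (the rewrite author's own statement) =====
-- stated objective: alternative
-- what changed: B drops A's precomputed callout_indices list, counter-vs-previous_counter state and per-index membership lookahead; it instead scans for each maximal run of callout lines and renders the whole block as a unit (head -> opening div, tail -> <br/>, last line gets the closing tag), rebuilding the list.
import Mathlib
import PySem

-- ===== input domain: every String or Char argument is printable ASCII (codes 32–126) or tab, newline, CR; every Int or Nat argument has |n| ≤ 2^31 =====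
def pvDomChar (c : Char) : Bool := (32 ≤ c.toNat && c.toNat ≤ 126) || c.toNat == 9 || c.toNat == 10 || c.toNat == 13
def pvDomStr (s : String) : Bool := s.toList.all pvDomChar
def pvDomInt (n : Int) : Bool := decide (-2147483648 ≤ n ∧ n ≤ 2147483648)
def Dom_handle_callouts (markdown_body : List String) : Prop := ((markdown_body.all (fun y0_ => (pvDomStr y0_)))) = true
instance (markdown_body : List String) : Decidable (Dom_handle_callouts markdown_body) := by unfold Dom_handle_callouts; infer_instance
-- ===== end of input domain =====

-- B replaces A's precomputed callout_indices + counter-state loop by a block-at-a-time scan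
-- that renders each maximal run of callout lines as a unit (objective: alternative).
-- Both Pythons mutate markdown_body in place; the theorems are about the returned value.

-- ===== PORT A =====
-- indices of lines containing "> " (A's list comprehension over enumerate)
def calloutIdx (body : List String) : List Int :=
  (PySem.List.enumerate body 0).filterMap
    (fun p => if PySem.Str.isIn "> " p.2 then some p.1 else none)

-- one iteration of A's `for i in callout_indices` loop; state = (markdown_body, callout_counter, previous_counter)
def calloutStepA (idxs : List Int) (st : List String × Int × Int) (i : Int) :
    List String × Int × Int :=
  let body := st.1
  let cc := st.2.1
  let pc := st.2.2
  let callout_content := PySem.Str.stripChars (PySem.List.pyGetD body i "") "\n"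
  let bp : List String × Int :=
    if pc == cc then
      (PySem.List.pySetD body i (PySem.Str.replace callout_content "> " "<br/>\n"), pc)
    else
      (PySem.List.pySetD body i
        (PySem.Str.replace callout_content "> "
          ("<div id=\"callout-" ++ PySem.Int.toStr cc ++ "\"><blockquote>")), cc)
  if (i + 1) ∉ idxs then
    (PySem.List.pySetD bp.1 i (PySem.List.pyGetD bp.1 i "" ++ "</blockquote></div>\n"), cc + 1, bp.2)
  else
    (bp.1, cc, bp.2)

def handle_callouts (markdown_body : List String) : List String :=
  let callout_indices := calloutIdx markdown_body
  (callout_indices.foldl (calloutStepA callout_indices) (markdown_body, 1, 0)).1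

-- ===== PORT B =====
-- `rendered[-1] += s` of Source B
def appendLast (s : String) : List String → List String
  | [] => []
  | [x] => [x ++ s]
  | x :: xs => x :: appendLast s xs

-- Source B's outer while loop; the inner `while j < n and "> " in markdown_body[j]` scan that
-- delimits the block starting at i is the takeWhile/dropWhile split of the suffix.
def renderBlocks : List String → Int → List String
  | [], _ => []
  | x :: xs, counter =>
    if PySem.Str.isIn "> " x then
      let t := xs.takeWhile (fun l => PySem.Str.isIn "> " l)
      let r := xs.dropWhile (fun l => PySem.Str.isIn "> " l)
      -- block = [line.strip("\n") for line in markdown_body[i:j]]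
      let blockTail := t.map (fun l => PySem.Str.stripChars l "\n")
      -- rendered = [block[0].replace(...)] + [b.replace(...) for b in block[1:]]
      let rendered :=
        (PySem.Str.replace (PySem.Str.stripChars x "\n") "> "
          ("<div id=\"callout-" ++ PySem.Int.toStr counter ++ "\"><blockquote>"))
        :: blockTail.map (fun b => PySem.Str.replace b "> " "<br/>\n")
      appendLast "</blockquote></div>\n" rendered ++ renderBlocks r (counter + 1)
    else x :: renderBlocks xs counter
termination_by l _ => l.length
decreasing_by
  · simp only [List.length_cons]
    exact Nat.lt_succ_of_le (List.length_dropWhile_le _ _)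
  · simp

def handle_callouts_alt (markdown_body : List String) : List String :=
  renderBlocks markdown_body 1

-- ===== PRECONDITION & SPEC =====
def Spec_handle_callouts (markdown_body : List String) (out : List String) : Prop := out = handle_callouts_alt markdown_body
instance (markdown_body : List String) (out : List String) : Decidable (Spec_handle_callouts markdown_body out) := by unfold Spec_handle_callouts; infer_instance

-- ===== CLAIM (what is proved, stated in full; the proofs are below) =====
def Claim_equal_handle_callouts : Prop := ∀ (markdown_body : List String), Dom_handle_callouts markdown_body → Spec_handle_callouts markdown_body (handle_callouts markdown_body)

-- ===== LEMMAS AND PROOFS =====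

-- proof-only canonical form: a single pass carrying callout_counter and an in_block flag;
-- both ports are proved equal to it.
def calloutGoB : List String → Int → Bool → List String
  | [], _, _ => []
  | line :: rest, cc, in_block =>
    if PySem.Str.isIn "> " line then
      let content := PySem.Str.stripChars line "\n"
      let newLine :=
        if in_block then PySem.Str.replace content "> " "<br/>\n"
        else PySem.Str.replace content "> "
          ("<div id=\"callout-" ++ PySem.Int.toStr cc ++ "\"><blockquote>")
      let ends :=
        match rest with
        | [] => true
        | next :: _ => !(PySem.Str.isIn "> " next)
      if ends then (newLine ++ "</blockquote></div>\n") :: calloutGoB rest (cc + 1) false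
      else newLine :: calloutGoB rest cc true
    else line :: calloutGoB rest cc in_block

-- callout indices of a suffix xs of the original list, with the offset s of its first line
def idxFrom (s : Int) (xs : List String) : List Int :=
  (PySem.List.enumerate xs s).filterMap
    (fun p => if PySem.Str.isIn "> " p.2 then some p.1 else none)

theorem idxFrom_nil (s : Int) : idxFrom s [] = [] := rfl

theorem idxFrom_cons (s : Int) (x : String) (xs : List String) :
    idxFrom s (x :: xs) =
      (if PySem.Str.isIn "> " x then [s] else []) ++ idxFrom (s + 1) xs := by
  simp only [idxFrom, PySem.List.enumerate_cons, List.filterMap_cons]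
  split <;> rename_i h <;> simp [PySem.Str.isIn] at h <;> simp [h]

theorem calloutIdx_eq (body : List String) : calloutIdx body = idxFrom 0 body := rfl

theorem le_of_mem_idxFrom {s k : Int} {xs : List String} (h : k ∈ idxFrom s xs) : s ≤ k := by
  induction xs generalizing s with
  | nil => simp [idxFrom_nil] at h
  | cons x xs ih =>
    rw [idxFrom_cons] at h
    rcases List.mem_append.1 h with h | h
    · split at h <;> simp_all
    · have := ih h; omega

theorem mem_idxFrom_head (s : Int) (xs : List String) :
    (s ∈ idxFrom s xs) =
      (match xs with
       | [] => False
       | y :: _ => PySem.Str.isIn "> " y = true) := by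
  cases xs with
  | nil => simp [idxFrom_nil]
  | cons y ys =>
    rw [idxFrom_cons]
    have hys : s ∉ idxFrom (s + 1) ys := fun h => by have := le_of_mem_idxFrom h; omega
    split <;> simp_all

theorem set_append_cons (pre : List String) (x v : String) (xs : List String) :
    (pre ++ x :: xs).set pre.length v = pre ++ v :: xs := by
  induction pre with
  | nil => simp
  | cons p ps ih => simp [ih]

-- does the next (unmodified) line continue the callout block?
def nextIsCallout : List String → Prop
  | [] => False
  | y :: _ => PySem.Str.isIn "> " y = true

theorem goB_cons_cont (x : String) (xs : List String) (cc : Int) (inb : Bool)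
    (hP : PySem.Str.isIn "> " x = true)
    (hxs : nextIsCallout xs) :
    calloutGoB (x :: xs) cc inb =
      (if inb then PySem.Str.replace (PySem.Str.stripChars x "\n") "> " "<br/>\n"
       else PySem.Str.replace (PySem.Str.stripChars x "\n") "> "
         ("<div id=\"callout-" ++ PySem.Int.toStr cc ++ "\"><blockquote>"))
        :: calloutGoB xs cc true := by
  have hP' : PySem.Chars.isIn ['>', ' '] x.toList = true := by simpa using hP
  cases xs with
  | nil => exact hxs.elim
  | cons y ys =>
    have hy : PySem.Chars.isIn ['>', ' '] y.toList = true := by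
      simpa [nextIsCallout] using hxs
    simp [calloutGoB, hP', hy]

theorem goB_cons_end (x : String) (xs : List String) (cc : Int) (inb : Bool)
    (hP : PySem.Str.isIn "> " x = true)
    (hxs : ¬ nextIsCallout xs) :
    calloutGoB (x :: xs) cc inb =
      ((if inb then PySem.Str.replace (PySem.Str.stripChars x "\n") "> " "<br/>\n"
        else PySem.Str.replace (PySem.Str.stripChars x "\n") "> "
          ("<div id=\"callout-" ++ PySem.Int.toStr cc ++ "\"><blockquote>"))
         ++ "</blockquote></div>\n")
        :: calloutGoB xs (cc + 1) false := by
  have hP' : PySem.Chars.isIn ['>', ' '] x.toList = true := by simpa using hP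
  cases xs with
  | nil => simp [calloutGoB, hP']
  | cons y ys =>
    have hy : PySem.Chars.isIn ['>', ' '] y.toList = false := by
      have := hxs
      simp only [nextIsCallout] at this
      simpa using this
    simp [calloutGoB, hP', hy]

theorem goB_cons_skip (x : String) (xs : List String) (cc : Int) (inb : Bool)
    (hP : PySem.Str.isIn "> " x = false) :
    calloutGoB (x :: xs) cc inb = x :: calloutGoB xs cc inb := by
  have hP' : PySem.Chars.isIn ['>', ' '] x.toList = false := by simpa using hP
  simp [calloutGoB, hP']

-- the loop invariant for A: folding A's step over the callout indices of the suffix xs, on a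
-- body whose prefix pre is already processed, yields pre ++ the canonical pass over xs;
-- previous_counter pc equals callout_counter cc exactly when the in_block flag is set.
theorem mainLemma (xs : List String) :
    ∀ (pre : List String) (cc pc : Int) (inb : Bool) (idxs : List Int),
      pc = (if inb then cc else cc - 1) →
      (∀ k : Int, (pre.length : Int) ≤ k → (k ∈ idxs ↔ k ∈ idxFrom (pre.length : Int) xs)) →
      ((idxFrom (pre.length : Int) xs).foldl (calloutStepA idxs) (pre ++ xs, cc, pc)).1
        = pre ++ calloutGoB xs cc inb := by
  induction xs with
  | nil => intro pre cc pc inb idxs _ _; simp [idxFrom_nil, calloutGoB]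
  | cons x xs ih =>
    intro pre cc pc inb idxs hpc H
    rw [idxFrom_cons]
    by_cases hP : PySem.Str.isIn "> " x = true
    · -- x is a callout line
      rw [if_pos hP, List.singleton_append, List.foldl_cons]
      have hget : PySem.List.pyGetD (pre ++ x :: xs) ((pre.length : Int)) "" = x := by
        simp [PySem.List.pyGetD_natCast]
      have hmem : ((pre.length : Int) + 1 ∈ idxs) ↔
          ((pre.length : Int) + 1 ∈ idxFrom ((pre.length : Int) + 1) xs) := by
        rw [H ((pre.length : Int) + 1) (by omega), idxFrom_cons, List.mem_append]
        exact or_iff_right (by rw [if_pos hP]; simp)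
      set v : String :=
        (if inb then
          PySem.Str.replace (PySem.Str.stripChars x "\n") "> " "<br/>\n"
        else
          PySem.Str.replace (PySem.Str.stripChars x "\n") "> "
            ("<div id=\"callout-" ++ PySem.Int.toStr cc ++ "\"><blockquote>")) with hv
      have hpcb : (pc == cc) = inb := by
        rw [hpc]; cases inb <;> simp
      have hstep : calloutStepA idxs (pre ++ x :: xs, cc, pc) ((pre.length : Int)) =
          if ((pre.length : Int) + 1) ∉ idxs then
            (pre ++ (v ++ "</blockquote></div>\n") :: xs, cc + 1, cc)
          else (pre ++ v :: xs, cc, cc) := by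
        unfold calloutStepA
        simp only [hget, hpcb]
        cases inb <;> rw [hv] <;>
          simp only [Bool.false_eq_true, if_true, if_false,
            PySem.List.pySetD_natCast, PySem.List.pyGetD_natCast, set_append_cons] <;>
          split <;>
          simp [hpc]
      rw [hstep]
      by_cases hend : ((pre.length : Int) + 1) ∈ idxs
      · -- block continues: next line is a callout line
        rw [if_neg (not_not_intro hend)]
        have hlen : (((pre ++ [v]).length : Int)) = ((pre.length : Int) + 1) := by
          simp
        have H' : ∀ k : Int, (((pre ++ [v]).length : Int)) ≤ k →
            (k ∈ idxs ↔ k ∈ idxFrom (((pre ++ [v]).length : Int)) xs) := by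
          intro k hk
          rw [hlen] at hk ⊢
          rw [H k (by omega), idxFrom_cons, List.mem_append]
          exact or_iff_right (by rw [if_pos hP]; simp; omega)
        have hrec := ih (pre ++ [v]) cc cc true idxs (by simp) H'
        rw [hlen, List.append_assoc, List.singleton_append] at hrec
        rw [hrec]
        have hend2 := hmem.1 hend
        have hnext : nextIsCallout xs := by
          cases xs with
          | nil => simp [idxFrom_nil] at hend2
          | cons y ys =>
            rw [mem_idxFrom_head] at hend2
            exact hend2
        rw [goB_cons_cont x xs cc inb hP hnext, ← hv]
        simp
      · -- block ends here: no next line, or it is not a callout line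
        rw [if_pos hend]
        have hlen : (((pre ++ [v ++ "</blockquote></div>\n"]).length : Int)) = ((pre.length : Int) + 1) := by
          simp
        have H' : ∀ k : Int, (((pre ++ [v ++ "</blockquote></div>\n"]).length : Int)) ≤ k →
            (k ∈ idxs ↔ k ∈ idxFrom (((pre ++ [v ++ "</blockquote></div>\n"]).length : Int)) xs) := by
          intro k hk
          rw [hlen] at hk ⊢
          rw [H k (by omega), idxFrom_cons, List.mem_append]
          exact or_iff_right (by rw [if_pos hP]; simp; omega)
        have hrec := ih (pre ++ [v ++ "</blockquote></div>\n"]) (cc + 1) cc false idxs (by simp) H'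
        rw [hlen, List.append_assoc, List.singleton_append] at hrec
        rw [hrec]
        have hend2 : ((pre.length : Int) + 1) ∉ idxFrom ((pre.length : Int) + 1) xs :=
          fun h => hend (hmem.2 h)
        have hnext : ¬ nextIsCallout xs := by
          cases xs with
          | nil => exact fun h => h.elim
          | cons y ys =>
            rw [mem_idxFrom_head] at hend2
            exact fun h => hend2 h
        rw [goB_cons_end x xs cc inb hP hnext, ← hv]
        simp
    · -- x is not a callout line
      have hPf : PySem.Str.isIn "> " x = false := by
        cases h : PySem.Str.isIn "> " x
        · rfl
        · exact absurd h hP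
      rw [if_neg hP, List.nil_append]
      have hlen : (((pre ++ [x]).length : Int)) = ((pre.length : Int) + 1) := by simp
      have H' : ∀ k : Int, (((pre ++ [x]).length : Int)) ≤ k →
          (k ∈ idxs ↔ k ∈ idxFrom (((pre ++ [x]).length : Int)) xs) := by
        intro k hk
        rw [hlen] at hk ⊢
        rw [H k (by omega), idxFrom_cons, List.mem_append]
        exact or_iff_right (by rw [if_neg hP]; simp)
      have hrec := ih (pre ++ [x]) cc pc inb idxs hpc H'
      rw [hlen, List.append_assoc, List.singleton_append] at hrec
      rw [hrec, goB_cons_skip x xs cc inb hPf]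
      simp

-- B's rendering of a block tail t (all callout lines), followed by the rest r whose head is
-- not a callout line, equals the canonical pass with in_block already set.
theorem runLemma (t : List String) :
    ∀ (r : List String) (cc : Int),
      t ≠ [] →
      (∀ y ∈ t, PySem.Str.isIn "> " y = true) →
      ¬ nextIsCallout r →
      calloutGoB (t ++ r) cc true =
        appendLast "</blockquote></div>\n"
          (t.map (fun l => PySem.Str.replace (PySem.Str.stripChars l "\n") "> " "<br/>\n"))
        ++ calloutGoB r (cc + 1) false := by
  induction t with
  | nil => intro r cc h; exact absurd rfl h
  | cons y t ih =>
    intro r cc _ hall hr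
    have hy : PySem.Str.isIn "> " y = true := hall y (List.mem_cons_self ..)
    cases t with
    | nil =>
      rw [List.singleton_append, goB_cons_end y r cc true hy hr]
      simp [appendLast]
    | cons z t' =>
      have hz : PySem.Str.isIn "> " z = true := hall z (by simp)
      have hcont : nextIsCallout ((z :: t') ++ r) := hz
      rw [List.cons_append, goB_cons_cont y ((z :: t') ++ r) cc true hy hcont]
      rw [ih r cc (by simp) (fun w hw => hall w (by simp [hw])) hr]
      simp [appendLast]

-- head of dropWhile fails the predicate
theorem dropWhile_head_false {α : Type} (p : α → Bool) (l : List α) :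
    ∀ z zs, l.dropWhile p = z :: zs → p z = false := by
  induction l with
  | nil => intro z zs h; simp at h
  | cons x xs ih =>
    intro z zs h
    by_cases hx : p x = true
    · rw [List.dropWhile_cons_of_pos hx] at h; exact ih z zs h
    · have hx' : p x = false := by cases h' : p x; rfl; exact absurd h' hx
      rw [List.dropWhile_cons_of_neg (by simp [hx'])] at h
      cases h; exact hx'

-- B equals the canonical pass
theorem renderBlocks_eq (n : Nat) :
    ∀ (xs : List String), xs.length ≤ n → ∀ cc, renderBlocks xs cc = calloutGoB xs cc false := by
  induction n with
  | zero =>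
    intro xs hlen cc
    have : xs = [] := List.eq_nil_of_length_eq_zero (Nat.le_zero.1 hlen)
    subst this; simp [renderBlocks, calloutGoB]
  | succ n ih =>
    intro xs hlen cc
    cases xs with
    | nil => simp [renderBlocks, calloutGoB]
    | cons x xs =>
      by_cases hP : PySem.Str.isIn "> " x = true
      · have hunfold : renderBlocks (x :: xs) cc =
            appendLast "</blockquote></div>\n"
              ((PySem.Str.replace (PySem.Str.stripChars x "\n") "> "
                  ("<div id=\"callout-" ++ PySem.Int.toStr cc ++ "\"><blockquote>"))
                :: ((xs.takeWhile (fun l => PySem.Str.isIn "> " l)).map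
                      (fun l => PySem.Str.stripChars l "\n")).map
                    (fun b => PySem.Str.replace b "> " "<br/>\n"))
            ++ renderBlocks (xs.dropWhile (fun l => PySem.Str.isIn "> " l)) (cc + 1) := by
          rw [renderBlocks]
          simp only [hP, if_true]
        rw [hunfold]
        have hxslen : xs.length ≤ n := by simpa using hlen
        rcases ht : xs.takeWhile (fun l => PySem.Str.isIn "> " l) with _ | ⟨b, bs⟩
        · -- block is just x; head of xs (if any) is not a callout line
          have hr : xs.dropWhile (fun l => PySem.Str.isIn "> " l) = xs := by
            cases xs with
            | nil => rfl
            | cons y ys =>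
              by_cases hy : PySem.Str.isIn "> " y = true
              · rw [List.takeWhile_cons_of_pos hy] at ht; cases ht
              · have hy' : PySem.Str.isIn "> " y = false := by
                  cases h' : PySem.Str.isIn "> " y; rfl; exact absurd h' hy
                exact List.dropWhile_cons_of_neg (by simpa using hy')
          have hnext : ¬ nextIsCallout xs := by
            cases xs with
            | nil => exact fun h => h.elim
            | cons y ys =>
              intro h
              by_cases hy : PySem.Str.isIn "> " y = true
              · rw [List.takeWhile_cons_of_pos hy] at ht; cases ht
              · exact hy h
          rw [goB_cons_end x xs cc false hP hnext, hr, ih xs hxslen (cc + 1)]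
          simp [appendLast]
        · -- block is x plus a nonempty run
          have hteq : xs.takeWhile (fun l => PySem.Str.isIn "> " l) = b :: bs := ht
          have hsplit : (b :: bs) ++ xs.dropWhile (fun l => PySem.Str.isIn "> " l) = xs := by
            rw [← hteq]; exact List.takeWhile_append_dropWhile
          have hallt : ∀ y ∈ (b :: bs), PySem.Str.isIn "> " y = true := by
            intro y hy
            have := List.mem_takeWhile_imp (hteq ▸ hy)
            simpa using this
          have hnextr : ¬ nextIsCallout (xs.dropWhile (fun l => PySem.Str.isIn "> " l)) := by
            cases hc : xs.dropWhile (fun l => PySem.Str.isIn "> " l) with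
            | nil => exact fun h => h.elim
            | cons z zs =>
              intro h
              have h0 := dropWhile_head_false (fun l => PySem.Str.isIn "> " l) xs z zs hc
              simp only [nextIsCallout] at h
              have h0c : PySem.Chars.isIn ['>', ' '] z.toList = false := by simpa using h0
              have h2 : PySem.Chars.isIn ['>', ' '] z.toList = true := by simpa using h
              rw [h0c] at h2
              cases h2
          have hcont : nextIsCallout xs := by
            rw [← hsplit]; exact hallt b (by simp)
          have hrun := runLemma (b :: bs) (xs.dropWhile (fun l => PySem.Str.isIn "> " l)) cc
            (by simp) hallt hnextr
          rw [hsplit] at hrun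
          rw [goB_cons_cont x xs cc false hP hcont, hrun]
          have hrlen : (xs.dropWhile (fun l => PySem.Str.isIn "> " l)).length ≤ n := by
            have h1 := List.length_dropWhile_le (fun l => PySem.Str.isIn "> " l) xs
            omega
          rw [ih _ hrlen (cc + 1)]
          have hmap : ((List.map (fun l => PySem.Str.stripChars l "\n") (b :: bs)).map
              (fun b => PySem.Str.replace b "> " "<br/>\n")) =
              List.map (fun l => PySem.Str.replace (PySem.Str.stripChars l "\n") "> " "<br/>\n")
                (b :: bs) := by
            rw [List.map_map]; simp [Function.comp_def]
          rw [hmap]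
          simp [appendLast]
      · have hPf : PySem.Str.isIn "> " x = false := by
          cases h' : PySem.Str.isIn "> " x; rfl; exact absurd h' hP
        rw [renderBlocks]
        simp only [hPf, Bool.false_eq_true, if_false]
        rw [goB_cons_skip x xs cc false hPf, ih xs (by simpa using hlen) cc]

-- ===== VERDICT (by name: the statement is the Claim_ definition above) =====
theorem handle_callouts_spec : Claim_equal_handle_callouts := by
  intro markdown_body _
  unfold Spec_handle_callouts handle_callouts handle_callouts_alt
  have hrec := mainLemma markdown_body [] 1 0 false (calloutIdx markdown_body)
    (by simp) (by intro k _; rw [calloutIdx_eq]; simp)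
  rw [renderBlocks_eq markdown_body.length markdown_body (le_refl _) 1]
  simpa [calloutIdx_eq] using hrec
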